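-- pv_equiv track=rewrite | github.com/edulol-1/beecrowd-problems | problems/1244-SortByLength/1244-SortByLength.py | ordena_lineas
-- ===== SOURCE A (Python) =====
-- def ordena_lineas(num_lineas, strings):
--     ''' Ordena las lineas de un string de acuerdo a la longitud de las palabras. Regresa el
--     string con cada linea ordenada de forma decreciente de acuerdo a la longitud de las
--     palabras.'''
--     cadena = ""
--     i = 1
--     while i <= num_lineas:
--         words = strings[i].split(" ")
--         length = len(words)
--         ordered_words = sorted(words, key=len, reverse=True)
--         j = 0
--         while j <= length-1:
--             cadena = cadena + ordered_words[j]
--             if j != length-1: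
--                 cadena = cadena + " "
--             j = j + 1
--         if i != num_lineas:
--             cadena = cadena + "\n"
--         i = i+1
--     return cadena
-- ===== SOURCE B (Python) =====
-- def ordena_lineas(num_lineas, strings):
--     lines = []
--     for i in range(1, num_lineas + 1):
--         words = strings[i].split(" ")
--         maxlen = 0
--         for w in words:
--             maxlen = max(maxlen, len(w))
--         buckets = [[] for _ in range(maxlen + 1)]
--         for w in words:
--             buckets[len(w)].append(w)
--         out = []
--         for L in range(maxlen, -1, -1):
--             out += buckets[L]
--         lines.append(" ".join(out))
--     return "\n".join(lines)
-- ===== Notes on version B (the rewrite author's own statement) =====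
-- stated objective: faster
-- what changed: Replaces the comparison sort (sorted key=len reverse=True) and index-driven while loops building the result by repeated string concatenation with a counting/bucket sort on word length (append each word to buckets[len(w)], emit buckets longest-first) and str.join for separators.
import Mathlib
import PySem

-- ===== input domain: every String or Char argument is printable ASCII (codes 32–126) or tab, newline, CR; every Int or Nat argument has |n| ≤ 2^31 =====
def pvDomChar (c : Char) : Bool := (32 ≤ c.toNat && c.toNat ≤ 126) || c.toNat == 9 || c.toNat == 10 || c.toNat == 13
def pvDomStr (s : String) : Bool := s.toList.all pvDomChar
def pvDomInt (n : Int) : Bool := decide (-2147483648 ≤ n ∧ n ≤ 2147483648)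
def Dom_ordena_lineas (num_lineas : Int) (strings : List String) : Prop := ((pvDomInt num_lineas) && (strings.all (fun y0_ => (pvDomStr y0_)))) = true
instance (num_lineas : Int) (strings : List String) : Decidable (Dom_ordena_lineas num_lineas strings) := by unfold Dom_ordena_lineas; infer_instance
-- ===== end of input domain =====

-- B replaces A's comparison sort (sorted key=len reverse=True) and manual separator bookkeeping
-- by a counting/bucket sort on word length plus str.join; equivalence of the RETURN value is proved.

-- ===== PORT A =====
-- inner while loop of A: j from 0 while j <= length-1, appending ordered_words[j] and " " between
def pvInnerA (ow : List String) (length : Int) : Int → String → Nat → String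
  | _, cad, 0 => cad
  | j, cad, fuel+1 =>
    if j ≤ length - 1 then
      pvInnerA ow length (j+1)
        ((cad ++ PySem.List.pyGetD ow j "") ++ (if j ≠ length - 1 then " " else "")) fuel
    else cad

-- outer while loop of A: i from 1 while i <= num_lineas
def pvOuterA (num_lineas : Int) (strings : List String) : Int → String → Nat → String
  | _, cad, 0 => cad
  | i, cad, fuel+1 =>
    if i ≤ num_lineas then
      let words := (PySem.Str.split? (PySem.List.pyGetD strings i "") " ").getD []
      let len : Int := words.length
      let ow := PySem.List.sorted words PySem.Str.len true
      let cad1 := pvInnerA ow len 0 cad len.toNat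
      let cad2 := if i ≠ num_lineas then cad1 ++ "\n" else cad1
      pvOuterA num_lineas strings (i+1) cad2 fuel
    else cad

def ordena_lineas (num_lineas : Int) (strings : List String) : String :=
  pvOuterA num_lineas strings 1 "" num_lineas.toNat

-- ===== PORT B =====
-- one line: bucket the words by length, emit buckets longest-first, join with " "
def pvLineB (s : String) : String :=
  let words := (PySem.Str.split? s " ").getD []
  let maxlen := words.foldl (fun acc w => max acc (PySem.Str.len w)) 0
  let buckets := words.foldl
    (fun bs w => PySem.List.pySetD bs (PySem.Str.len w)
      (PySem.List.pyGetD bs (PySem.Str.len w) [] ++ [w]))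
    (List.replicate (maxlen.toNat + 1) ([] : List String))
  let out := (PySem.List.pyRange maxlen (-1) (-1)).foldl
    (fun acc L => acc ++ PySem.List.pyGetD buckets L []) []
  PySem.Str.join " " out

def ordena_lineas_alt (num_lineas : Int) (strings : List String) : String :=
  PySem.Str.join "\n"
    ((PySem.List.pyRange 1 (num_lineas + 1) 1).map
      (fun i => pvLineB (PySem.List.pyGetD strings i "")))

-- ===== PRECONDITION & SPEC =====
-- Pre_ excludes exactly the inputs where A raises IndexError: some i with 1 ≤ i ≤ num_lineas out of range.
def Pre_ordena_lineas (num_lineas : Int) (strings : List String) : Prop :=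
  num_lineas ≤ 0 ∨ num_lineas < strings.length
instance (num_lineas : Int) (strings : List String) : Decidable (Pre_ordena_lineas num_lineas strings) := by unfold Pre_ordena_lineas; infer_instance

def pvWitness_ordena_lineas : Int × List String := (2, ["ignored", "b aa c", "dd e"])

def Spec_ordena_lineas (num_lineas : Int) (strings : List String) (out : String) : Prop := out = ordena_lineas_alt num_lineas strings
instance (num_lineas : Int) (strings : List String) (out : String) : Decidable (Spec_ordena_lineas num_lineas strings out) := by unfold Spec_ordena_lineas; infer_instance

-- ===== CLAIM (what is proved, stated in full; the proofs are below) =====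
def Claim_equal_ordena_lineas : Prop := ∀ (num_lineas : Int) (strings : List String), Dom_ordena_lineas num_lineas strings → Pre_ordena_lineas num_lineas strings → Spec_ordena_lineas num_lineas strings (ordena_lineas num_lineas strings)

-- ===== LEMMAS AND PROOFS =====

-- String-level join equations
theorem pvStrJoin_nil (sep : String) : PySem.Str.join sep [] = "" := by
  apply String.toList_inj.mp
  simp [PySem.Str.toList_join, PySem.Chars.join_nil]

theorem pvStrJoin_singleton (sep a : String) : PySem.Str.join sep [a] = a := by
  apply String.toList_inj.mp
  simp [PySem.Str.toList_join, PySem.Chars.join_singleton]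

theorem pvStrJoin_cons_cons (sep a b : String) (t : List String) :
    PySem.Str.join sep (a :: b :: t) = a ++ sep ++ PySem.Str.join sep (b :: t) := by
  apply String.toList_inj.mp
  simp [PySem.Str.toList_join, PySem.Chars.join_cons_cons]

theorem pvFlatMap_congr {α β : Type} (l : List α) (f g : α → List β)
    (h : ∀ x ∈ l, f x = g x) : l.flatMap f = l.flatMap g := by
  induction l with
  | nil => simp
  | cons a t ih =>
    simp only [List.flatMap_cons]
    rw [h a (by simp), ih (fun x hx => h x (by simp [hx]))]

theorem pvInsertBy_cons {α : Type} (bef : α → α → Bool) (w y : α) (ys : List α) :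
    PySem.List.insertBy bef w (y :: ys) =
      if bef w y then w :: y :: ys else y :: PySem.List.insertBy bef w ys := rfl

theorem pvInsertBy_append {α : Type} (bef : α → α → Bool) (w : α) (as bs : List α)
    (h : ∀ a ∈ as, bef w a = false) :
    PySem.List.insertBy bef w (as ++ bs) = as ++ PySem.List.insertBy bef w bs := by
  induction as with
  | nil => simp
  | cons a t ih =>
    simp only [List.cons_append]
    rw [pvInsertBy_cons, h a (by simp), if_neg (by simp)]
    rw [ih (fun x hx => h x (by simp [hx]))]

theorem pvInsertBy_cons_all {α : Type} (bef : α → α → Bool) (w : α) (bs : List α)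
    (h : ∀ b ∈ bs, bef w b = true) :
    PySem.List.insertBy bef w bs = w :: bs := by
  cases bs with
  | nil => rfl
  | cons b t => rw [pvInsertBy_cons, h b (by simp), if_pos rfl]

-- inserting w into a bucketed list appends it at the end of its own (length) bucket
theorem pvInsert_bucketed (Ls : List Int) (pre : List String) (w : String)
    (hp : Ls.Pairwise (· > ·)) (hw : PySem.Str.len w ∈ Ls) :
    PySem.List.insertBy (fun a b => decide (PySem.Str.len b < PySem.Str.len a)) w
      (Ls.flatMap (fun L => pre.filter (fun x => decide (PySem.Str.len x = L))))
    = Ls.flatMap (fun L => (pre ++ [w]).filter (fun x => decide (PySem.Str.len x = L))) := by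
  induction Ls with
  | nil => simp at hw
  | cons L Ls' ih =>
    rw [List.pairwise_cons] at hp
    obtain ⟨hL, hp'⟩ := hp
    simp only [List.flatMap_cons]
    by_cases hkey : PySem.Str.len w = L
    · rw [pvInsertBy_append _ _ _ _ (by
        intro a ha
        have : PySem.Str.len a = L := by
          have := List.of_mem_filter ha
          simpa using this
        rw [decide_eq_false_iff_not]
        omega)]
      rw [pvInsertBy_cons_all _ _ _ (by
        intro b hb
        obtain ⟨L'', hL'', hbf⟩ := List.mem_flatMap.mp hb
        have hbl : PySem.Str.len b = L'' := by
          have := List.of_mem_filter hbf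
          simpa using this
        have : L'' < L := hL L'' hL''
        rw [decide_eq_true_eq]
        omega)]
      have h1 : (pre ++ [w]).filter (fun x => decide (PySem.Str.len x = L))
          = pre.filter (fun x => decide (PySem.Str.len x = L)) ++ [w] := by
        rw [List.filter_append]
        have hd : (fun x => decide (PySem.Str.len x = L)) w = true := by
          simp only [decide_eq_true_eq]; exact hkey
        simp only [List.filter_cons, List.filter_nil, hd, if_true]
      have h2 : Ls'.flatMap (fun L => (pre ++ [w]).filter (fun x => decide (PySem.Str.len x = L)))
          = Ls'.flatMap (fun L => pre.filter (fun x => decide (PySem.Str.len x = L))) := by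
        apply pvFlatMap_congr
        intro L'' hL''
        rw [List.filter_append]
        have h3 : L'' < L := hL L'' hL''
        have hd : (fun x => decide (PySem.Str.len x = L'')) w = false := by
          rw [decide_eq_false_iff_not]; omega
        simp only [List.filter_cons, List.filter_nil, hd]
        simp
      rw [h1, h2]
      simp
    · have hw' : PySem.Str.len w ∈ Ls' := by
        rcases List.mem_cons.mp hw with h | h
        · exact absurd h hkey
        · exact h
      have hwlt : PySem.Str.len w < L := hL _ hw'
      rw [pvInsertBy_append _ _ _ _ (by
        intro a ha
        have : PySem.Str.len a = L := by
          have := List.of_mem_filter ha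
          simpa using this
        rw [decide_eq_false_iff_not]
        omega)]
      rw [ih hp' hw']
      have h1 : (pre ++ [w]).filter (fun x => decide (PySem.Str.len x = L))
          = pre.filter (fun x => decide (PySem.Str.len x = L)) := by
        rw [List.filter_append]
        have hd : (fun x => decide (PySem.Str.len x = L)) w = false := by
          rw [decide_eq_false_iff_not]; exact hkey
        simp only [List.filter_cons, List.filter_nil, hd]
        simp
      rw [h1]

-- Python's stable descending sort by length IS the bucket concatenation
theorem pvSorted_eq_bucketed (Ls : List Int) (ws : List String)
    (hp : Ls.Pairwise (· > ·)) (hmem : ∀ w ∈ ws, PySem.Str.len w ∈ Ls) :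
    PySem.List.sorted ws PySem.Str.len true
      = Ls.flatMap (fun L => ws.filter (fun x => decide (PySem.Str.len x = L))) := by
  rw [PySem.List.sorted_rev_eq_foldl_insertBy]
  induction ws using List.reverseRecOn with
  | nil => simp
  | append_singleton ws w ih =>
    rw [List.foldl_append]
    simp only [List.foldl_cons, List.foldl_nil]
    rw [ih (fun x hx => hmem x (by simp [hx]))]
    exact pvInsert_bucketed Ls ws w hp (hmem w (by simp))

-- the bucket-filling fold of B, characterised
theorem pvBuckets_spec (ws : List String) : ∀ (bs : List (List String)),
    (∀ w ∈ ws, (PySem.Str.len w).toNat < bs.length) → ∀ L : Nat, L < bs.length →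
    PySem.List.pyGetD (ws.foldl (fun bs w => PySem.List.pySetD bs (PySem.Str.len w)
      (PySem.List.pyGetD bs (PySem.Str.len w) [] ++ [w])) bs) (L : Int) []
    = PySem.List.pyGetD bs (L : Int) []
        ++ ws.filter (fun x => decide (PySem.Str.len x = (L : Int))) := by
  induction ws with
  | nil => intro bs _ L _; simp
  | cons w ws ih =>
    intro bs hlt L hL
    simp only [List.foldl_cons]
    have hw0 : (0 : Int) ≤ PySem.Str.len w := by simp [PySem.Str.len_eq]
    have hn : (PySem.Str.len w).toNat < bs.length := hlt w (by simp)
    have hcast : PySem.Str.len w = (((PySem.Str.len w).toNat : Nat) : Int) :=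
      (Int.toNat_of_nonneg hw0).symm
    rw [ih _ (by
        intro x hx
        rw [PySem.List.length_pySetD]
        exact hlt x (by simp [hx]))
      L (by rw [PySem.List.length_pySetD]; exact hL)]
    rw [hcast, PySem.List.pyGetD_pySetD_natCast bs _ L _ _ hn]
    by_cases hLn : L = (PySem.Str.len w).toNat
    · have hfl : (decide (PySem.Str.len w = (L : Int))) = true := by
        rw [decide_eq_true_eq, hcast]; omega
      rw [if_pos hLn, List.filter_cons, hfl]
      subst hLn
      simp
    · have hfl : (decide (PySem.Str.len w = (L : Int))) = false := by
        rw [decide_eq_false_iff_not, hcast]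
        intro hc
        exact hLn (by omega)
      rw [if_neg hLn, List.filter_cons, hfl]
      simp

-- B's line equals " ".join(sorted(words, key=len, reverse=True))
theorem pvLineB_eq (s : String) :
    pvLineB s = PySem.Str.join " "
      (PySem.List.sorted ((PySem.Str.split? s " ").getD []) PySem.Str.len true) := by
  simp only [pvLineB]
  set words := (PySem.Str.split? s " ").getD [] with hwords
  set maxlen := words.foldl (fun acc w => max acc (PySem.Str.len w)) 0 with hm
  have h0 : 0 ≤ maxlen := (PySem.List.le_foldl_max_int words PySem.Str.len 0).1
  have hub : ∀ w ∈ words, PySem.Str.len w ≤ maxlen :=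
    (PySem.List.le_foldl_max_int words PySem.Str.len 0).2
  have hlen0 : ∀ w : String, (0 : Int) ≤ PySem.Str.len w := fun w => by simp [PySem.Str.len_eq]
  have hp : (PySem.List.pyRange maxlen (-1) (-1)).Pairwise (· > ·) := by
    rw [PySem.List.pyRange_neg_one_eq_reverse]
    rw [List.pairwise_reverse]
    exact PySem.List.pairwise_lt_pyRange_one _ _
  have hmem : ∀ w ∈ words, PySem.Str.len w ∈ PySem.List.pyRange maxlen (-1) (-1) := by
    intro w hw
    rw [PySem.List.mem_pyRange_neg_one]
    exact ⟨by have := hlen0 w; omega, hub w hw⟩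
  congr 1
  rw [PySem.List.foldl_append_eq_flatMap, List.nil_append]
  rw [pvSorted_eq_bucketed (PySem.List.pyRange maxlen (-1) (-1)) words hp hmem]
  apply pvFlatMap_congr
  intro L hLmem
  have hLr := PySem.List.mem_pyRange_neg_one.mp hLmem
  have hL0 : 0 ≤ L := by omega
  have hLcast : L = ((L.toNat : Nat) : Int) := by omega
  rw [hLcast]
  rw [pvBuckets_spec words _ (by
      intro x hx
      rw [List.length_replicate]
      have := hub x hx
      have := hlen0 x
      omega)
    L.toNat (by rw [List.length_replicate]; omega)]
  have hrep : PySem.List.pyGetD (List.replicate (maxlen.toNat + 1) ([] : List String))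
      ((L.toNat : Nat) : Int) [] = [] := by
    rw [PySem.List.pyGetD_eq_getElem _ _ (by omega) (by rw [List.length_replicate]; push_cast; omega)]
    simp
  rw [hrep, List.nil_append]

-- A's inner loop produces cad ++ " ".join(remaining words)
theorem pvInnerA_eq : ∀ (fuel : Nat) (ow : List String) (k : Nat) (cad : String),
    ow.length ≤ k + fuel →
    pvInnerA ow (ow.length : Int) (k : Int) cad fuel
      = cad ++ PySem.Str.join " " (ow.drop k) := by
  intro fuel
  induction fuel with
  | zero =>
    intro ow k cad h
    have : ow.drop k = [] := List.drop_eq_nil_of_le (by omega)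
    rw [this, pvStrJoin_nil]
    simp [pvInnerA]
  | succ fuel ih =>
    intro ow k cad h
    by_cases hk : k < ow.length
    · have hcond : (k : Int) ≤ (ow.length : Int) - 1 := by omega
      rw [show pvInnerA ow (ow.length : Int) (k : Int) cad (fuel+1)
          = pvInnerA ow (ow.length : Int) ((k : Int)+1)
            ((cad ++ PySem.List.pyGetD ow (k : Int) "")
              ++ (if (k : Int) ≠ (ow.length : Int) - 1 then " " else "")) fuel from by
        simp only [pvInnerA, if_pos hcond]]
      have hcast : ((k : Int) + 1) = (((k+1 : Nat) : Nat) : Int) := by push_cast; ring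
      rw [hcast, ih ow (k+1) _ (by omega)]
      have hdrop : ow.drop k = ow[k] :: ow.drop (k+1) := List.drop_eq_getElem_cons hk
      have hget : PySem.List.pyGetD ow (k : Int) "" = ow[k] :=
        PySem.List.pyGetD_eq_getElem ow "" (by omega) (by omega)
      by_cases hlast : k = ow.length - 1
      · have hnil : ow.drop (k+1) = [] := List.drop_eq_nil_of_le (by omega)
        rw [hdrop, hnil, pvStrJoin_singleton, hget,
          if_neg (show ¬ ((k : Int) ≠ (ow.length : Int) - 1) by omega)]
        simp [pvStrJoin_nil]
      · have hne : k + 1 < ow.length := by omega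
        have hcons : ow.drop (k+1) = ow[k+1] :: ow.drop (k+2) := List.drop_eq_getElem_cons hne
        have hift : (if (k : Int) ≠ (ow.length : Int) - 1 then " " else "") = " " := by
          rw [if_pos]; omega
        rw [hdrop, hcons, pvStrJoin_cons_cons, hget, hift, ← hcons]
        simp [String.append_assoc]
    · have hcond : ¬ ((k : Int) ≤ (ow.length : Int) - 1) := by omega
      rw [show pvInnerA ow (ow.length : Int) (k : Int) cad (fuel+1) = cad from by
        simp only [pvInnerA, if_neg hcond]]
      have : ow.drop k = [] := List.drop_eq_nil_of_le (by omega)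
      rw [this, pvStrJoin_nil]
      simp

-- A's outer loop produces cad ++ "\n".join(lines i .. n)
theorem pvOuterA_eq : ∀ (fuel : Nat) (n : Int) (strings : List String) (i : Int) (cad : String),
    n + 1 ≤ i + fuel →
    pvOuterA n strings i cad fuel
      = cad ++ PySem.Str.join "\n"
          ((PySem.List.pyRange i (n+1) 1).map
            (fun t => pvLineB (PySem.List.pyGetD strings t ""))) := by
  intro fuel
  induction fuel with
  | zero =>
    intro n strings i cad h
    rw [PySem.List.pyRange_one_eq_nil (by omega)]
    simp [pvOuterA, pvStrJoin_nil]
  | succ fuel ih =>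
    intro n strings i cad h
    by_cases hi : i ≤ n
    · have hline : pvInnerA (PySem.List.sorted ((PySem.Str.split? (PySem.List.pyGetD strings i "") " ").getD []) PySem.Str.len true)
          (((PySem.Str.split? (PySem.List.pyGetD strings i "") " ").getD []).length : Int) 0
          cad (((PySem.Str.split? (PySem.List.pyGetD strings i "") " ").getD []).length : Int).toNat
          = cad ++ pvLineB (PySem.List.pyGetD strings i "") := by
        set words := (PySem.Str.split? (PySem.List.pyGetD strings i "") " ").getD [] with hw
        set ow := PySem.List.sorted words PySem.Str.len true with how
        have hlen : (words.length : Int) = (ow.length : Int) := by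
          rw [how, PySem.List.length_sorted]
        have htn : ((ow.length : Int)).toNat = ow.length := by omega
        rw [hlen, htn, pvLineB_eq, ← hw, ← how]
        have h00 := pvInnerA_eq ow.length ow 0 cad (by omega)
        simpa using h00
      rw [show pvOuterA n strings i cad (fuel+1)
          = pvOuterA n strings (i+1)
              ((if i ≠ n
                then (cad ++ pvLineB (PySem.List.pyGetD strings i "")) ++ "\n"
                else (cad ++ pvLineB (PySem.List.pyGetD strings i "")))) fuel from by
        simp only [pvOuterA, if_pos hi]
        rw [hline]]
      rw [ih n strings (i+1)
        (if i ≠ n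
          then (cad ++ pvLineB (PySem.List.pyGetD strings i "")) ++ "\n"
          else (cad ++ pvLineB (PySem.List.pyGetD strings i ""))) (by omega)]
      rw [PySem.List.pyRange_one_cons (a := i) (b := n+1) (by omega)]
      by_cases hlast : i = n
      · have : PySem.List.pyRange (i+1) (n+1) 1 = [] := PySem.List.pyRange_one_eq_nil (by omega)
        rw [this]
        simp only [List.map_cons, List.map_nil]
        rw [pvStrJoin_singleton, if_neg (by omega), pvStrJoin_nil]
        simp
      · have hcons : PySem.List.pyRange (i+1) (n+1) 1
            = (i+1) :: PySem.List.pyRange (i+1+1) (n+1) 1 :=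
          PySem.List.pyRange_one_cons (by omega)
        rw [List.map_cons, hcons, List.map_cons, pvStrJoin_cons_cons, if_pos hlast]
        simp [String.append_assoc]
    · rw [show pvOuterA n strings i cad (fuel+1) = cad from by
        simp only [pvOuterA, if_neg hi]]
      rw [PySem.List.pyRange_one_eq_nil (by omega)]
      simp [pvStrJoin_nil]

-- ===== VERDICT (by name: the statement is the Claim_ definition above) =====
theorem ordena_lineas_spec : Claim_equal_ordena_lineas := by
  unfold Claim_equal_ordena_lineas Spec_ordena_lineas
  intro n strings _ _
  unfold ordena_lineas ordena_lineas_alt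
  rw [pvOuterA_eq n.toNat n strings 1 "" (by omega)]
  simp
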